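-- pv_equiv track=rewrite | github.com/WhatMakesAGoodCM/What-Makes-a-Good-Commit-Message | CommitMessage/Preprocessor/github_preprocessor3.py | get_unreplacable
-- ===== SOURCE A (Python) =====
-- def get_unreplacable(message, replacement):
--     unreplacable_indices = []
--     start = 0
--     index = str(message).find(replacement, start, len(message))
--     while index > -1:
--         start = index + len(replacement)
--         for i in range(index, start):
--             unreplacable_indices.append(i)
--         index = str(message).find(replacement, start, len(message))
--     return unreplacable_indices
-- ===== SOURCE B (Python) =====
-- def get_unreplacable(message, replacement):
--     # Complement view: split the message on the replacement; the split parts are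
--     # exactly the uncovered gaps, so the covered indices are the len(replacement)-
--     # sized blocks sitting between consecutive parts.
--     m = len(replacement)
--     out = []
--     pos = 0
--     for part in str(message).split(replacement)[:-1]:
--         pos += len(part)
--         out.extend(range(pos, pos + m))
--         pos += m
--     return out
-- ===== Notes on version B (the rewrite author's own statement) =====
-- stated objective: idiomatic
-- what changed: B takes the complement view: instead of A's loop of repeated str.find calls with an inner index-appending loop, it splits the message on the replacement once and reconstructs the covered index blocks from the lengths of the parts between matches; Pre_ excludes replacement == '', on which A loops forever while B's split('') raises ValueError.
import Mathlib
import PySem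

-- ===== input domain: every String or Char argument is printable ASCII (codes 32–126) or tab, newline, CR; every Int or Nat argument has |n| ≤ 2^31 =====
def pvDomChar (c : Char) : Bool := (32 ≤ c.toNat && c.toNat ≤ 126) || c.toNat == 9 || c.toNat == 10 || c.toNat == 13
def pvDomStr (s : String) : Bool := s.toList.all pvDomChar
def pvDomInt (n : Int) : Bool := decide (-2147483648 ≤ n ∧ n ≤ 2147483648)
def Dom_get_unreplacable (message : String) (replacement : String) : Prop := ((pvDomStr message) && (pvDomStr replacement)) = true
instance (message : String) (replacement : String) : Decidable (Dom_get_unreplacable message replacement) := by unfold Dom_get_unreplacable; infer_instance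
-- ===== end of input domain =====

-- B replaces A's repeated str.find loop by one str.split call on the replacement, rebuilding
-- the covered index blocks from the lengths of the parts between matches (idiomatic, not faster).

-- ===== PORT A =====
-- A's while loop: recompute message.find(replacement, start, len(message)) each round and
-- append range(index, index+len(replacement)). Fuel only makes the recursion total (A
-- diverges when replacement = "", which Pre_ excludes); one unit per loop iteration suffices
-- under Pre_ since start strictly increases and stays ≤ len(message).
def pvLoopA (msg pat : List Char) : Nat → Int → List Int → List Int
  | 0, _, acc => acc
  | fuel+1, start, acc =>
    let index := PySem.Chars.findFrom msg pat start (some (PySem.Chars.len msg))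
    if index > -1 then
      let start' := index + PySem.Chars.len pat
      pvLoopA msg pat fuel start' (acc ++ PySem.List.pyRange index start' 1)
    else acc

def get_unreplacable (message : String) (replacement : String) : List Int :=
  pvLoopA message.toList replacement.toList (message.toList.length + 1) 0 []

-- ===== PORT B =====
-- B: m = len(replacement); for part in message.split(replacement)[:-1]:
--      pos += len(part); out.extend(range(pos, pos+m)); pos += m
def get_unreplacable_alt (message : String) (replacement : String) : List Int :=
  let m : Int := (replacement.toList.length : Int)
  ((PySem.List.slice (PySem.Chars.splitOn message.toList replacement.toList) none (some (-1))).foldl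
      (fun (st : Int × List Int) (part : List Char) =>
        let pos := st.1 + (part.length : Int)
        (pos + m, st.2 ++ PySem.List.pyRange pos (pos + m) 1))
      (0, [])).2

-- ===== PRECONDITION & SPEC =====
-- Pre_ excludes replacement = "": there A never returns (str.find of the empty pattern keeps
-- returning the same start, so the while loop runs forever), and B's split('') raises ValueError.
def Pre_get_unreplacable (message : String) (replacement : String) : Prop := replacement ≠ ""
instance (message : String) (replacement : String) : Decidable (Pre_get_unreplacable message replacement) := by unfold Pre_get_unreplacable; infer_instance
def pvWitness_get_unreplacable : String × String := ("abcabcab", "abc")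

def Spec_get_unreplacable (message : String) (replacement : String) (out : List Int) : Prop := out = get_unreplacable_alt message replacement
instance (message : String) (replacement : String) (out : List Int) : Decidable (Spec_get_unreplacable message replacement out) := by unfold Spec_get_unreplacable; infer_instance

-- ===== CLAIM (what is proved, stated in full; the proofs are below) =====
def Claim_equal_get_unreplacable : Prop := ∀ (message : String) (replacement : String), Dom_get_unreplacable message replacement → Pre_get_unreplacable message replacement → Spec_get_unreplacable message replacement (get_unreplacable message replacement)

-- ===== LEMMAS AND PROOFS =====

-- Proof-side canonical split: the parts of l between greedy non-overlapping matches of c::cs.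
def pvParts (c : Char) (cs : List Char) : List Char → List (List Char)
  | [] => [[]]
  | a :: rest =>
    if (c :: cs).isPrefixOf (a :: rest) then
      [] :: pvParts c cs ((a :: rest).drop (c :: cs).length)
    else
      match pvParts c cs rest with
      | p :: ps => (a :: p) :: ps
      | [] => [[a]]
termination_by l => l.length
decreasing_by all_goals
  first
  | (simp; omega)
  | simp

lemma pvParts_ne_nil (c : Char) (cs : List Char) (l : List Char) : pvParts c cs l ≠ [] := by
  match l with
  | [] => simp [pvParts]
  | a :: rest =>
    rw [pvParts]
    split
    · simp
    · cases hp : pvParts c cs rest <;> simp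

-- No occurrence at all: a single part.
lemma pvParts_no (c : Char) (cs : List Char) (l : List Char)
    (h : ¬ (c :: cs) <:+: l) : pvParts c cs l = [l] := by
  match l with
  | [] => simp [pvParts]
  | a :: rest =>
    rw [pvParts]
    rw [if_neg (fun hp => h (List.isPrefixOf_iff_prefix.mp hp).isInfix)]
    have hr : ¬ (c :: cs) <:+: rest := fun hi => h (hi.trans (List.suffix_cons a rest).isInfix)
    rw [pvParts_no c cs rest hr]

-- First occurrence at j: first part is take j, continue after j + m.
lemma pvParts_first (c : Char) (cs : List Char) (l : List Char) (j : Nat)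
    (hpre : (c :: cs) <+: l.drop j) (hmin : ∀ i, i < j → ¬ (c :: cs) <+: l.drop i) :
    pvParts c cs l = l.take j :: pvParts c cs (l.drop (j + (c :: cs).length)) := by
  induction j generalizing l with
  | zero =>
    match l with
    | [] =>
      exfalso
      have := hpre.length_le
      simp at this
    | a :: rest =>
      rw [pvParts]
      rw [if_pos (List.isPrefixOf_iff_prefix.mpr (by simpa using hpre))]
      simp
  | succ j ih =>
    match l with
    | [] =>
      exfalso
      have := hpre.length_le
      simp at this
    | a :: rest =>
      have h0 : ¬ (c :: cs).isPrefixOf (a :: rest) := by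
        intro hp
        exact hmin 0 (by omega) (by simpa using List.isPrefixOf_iff_prefix.mp hp)
      rw [pvParts, if_neg h0]
      rw [ih rest (by simpa using hpre) (fun i hi => by
        have := hmin (i+1) (by omega)
        simpa using this)]
      have harith : j + 1 + (c :: cs).length = (j + (c :: cs).length) + 1 := by omega
      rw [harith]
      simp

-- splitOn.go reduction equations (the fuel pattern fuel+1 makes the match reduce).
lemma pvGo_nil (sep : List Char) (fuel : Nat) (cur : List Char) (acc : List (List Char)) :
    PySem.Chars.splitOn.go sep (fuel+1) [] cur acc = (cur.reverse :: acc).reverse := rfl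

lemma pvGo_cons (sep : List Char) (fuel : Nat) (a : Char) (rest cur : List Char)
    (acc : List (List Char)) :
    PySem.Chars.splitOn.go sep (fuel+1) (a :: rest) cur acc
      = if sep.isPrefixOf (a :: rest) then
          PySem.Chars.splitOn.go sep fuel ((a :: rest).drop sep.length) [] (cur.reverse :: acc)
        else
          PySem.Chars.splitOn.go sep fuel rest (a :: cur) acc := rfl

-- PySem's splitOn.go computes pvParts (with cur prepended to the first part, acc in front).
lemma pvGo_eq (c : Char) (cs : List Char) :
    ∀ (fuel : Nat) (l cur : List Char) (acc : List (List Char)), l.length + 1 ≤ fuel →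
    PySem.Chars.splitOn.go (c :: cs) fuel l cur acc
      = acc.reverse ++ (match pvParts c cs l with
          | p :: ps => (cur.reverse ++ p) :: ps
          | [] => []) := by
  intro fuel
  induction fuel with
  | zero => intro l cur acc h; omega
  | succ fuel ih =>
    intro l cur acc h
    match l with
    | [] =>
      rw [pvGo_nil]
      simp [pvParts]
    | a :: rest =>
      rw [pvGo_cons]
      by_cases hp : (c :: cs).isPrefixOf (a :: rest)
      · rw [if_pos hp]
        have hlen : (List.drop (c :: cs).length (a :: rest)).length + 1 ≤ fuel := by
          have h1 := (List.isPrefixOf_iff_prefix.mp hp).length_le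
          simp only [List.length_drop, List.length_cons] at h1 h ⊢
          omega
        rw [ih _ [] _ hlen]
        conv_rhs => rw [pvParts, if_pos hp]
        cases hps : pvParts c cs ((a :: rest).drop (c :: cs).length) with
        | nil => exact absurd hps (pvParts_ne_nil c cs _)
        | cons p ps => simp
      · rw [if_neg hp]
        rw [ih rest (a :: cur) acc (by simp at h ⊢; omega)]
        conv_rhs => rw [pvParts, if_neg hp]
        cases hps : pvParts c cs rest with
        | nil => exact absurd hps (pvParts_ne_nil c cs rest)
        | cons p ps => simp

lemma pvSplitOn_eq (c : Char) (cs : List Char) (l : List Char) :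
    PySem.Chars.splitOn l (c :: cs) = pvParts c cs l := by
  rw [PySem.Chars.splitOn, pvGo_eq c cs (l.length + 1) l [] [] le_rfl]
  cases hps : pvParts c cs l with
  | nil => exact absurd hps (pvParts_ne_nil c cs l)
  | cons p ps => simp

-- The covered indices emitted from the parts list: between consecutive parts, one m-block.
def pvEmit (m : Int) : Int → List (List Char) → List Int
  | _, [] => []
  | _, [_] => []
  | base, p :: q :: qs =>
    PySem.List.pyRange (base + (p.length : Int)) (base + (p.length : Int) + m) 1
      ++ pvEmit m (base + (p.length : Int) + m) (q :: qs)

-- B's fold over parts[:-1] computes pvEmit.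
lemma pvFold_eq (m : Int) (parts : List (List Char)) :
    ∀ (pos : Int) (out : List Int),
    (parts.dropLast.foldl
        (fun (st : Int × List Int) (part : List Char) =>
          let pos := st.1 + (part.length : Int)
          (pos + m, st.2 ++ PySem.List.pyRange pos (pos + m) 1))
        (pos, out)).2 = out ++ pvEmit m pos parts := by
  induction parts with
  | nil => intro pos out; simp [pvEmit]
  | cons p tail ih =>
    intro pos out
    cases tail with
    | nil => simp [pvEmit]
    | cons q qs =>
      rw [List.dropLast_cons₂, List.foldl_cons, ih]
      simp [pvEmit, List.append_assoc]

-- A passes end = len(message) to find; that bound is the default.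
lemma pvFindFrom_some_len (s sub : List Char) (k : Int) :
    PySem.Chars.findFrom s sub k (some (s.length:Int)) = PySem.Chars.findFrom s sub k none := by
  have h : ¬((s.length:Int) < 0) := by omega
  simp [PySem.Chars.findFrom, if_neg h, List.take_length]

-- Main A-side correspondence: A's find-loop from start = k emits pvEmit over pvParts of msg.drop k.
lemma pvLoopA_eq (msg : List Char) (c : Char) (cs : List Char) :
    ∀ (fuel k : Nat) (acc : List Int), k ≤ msg.length → msg.length + 1 ≤ fuel + k →
    pvLoopA msg (c :: cs) fuel (k:Int) acc
      = acc ++ pvEmit ((c :: cs).length : Int) (k:Int) (pvParts c cs (msg.drop k)) := by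
  intro fuel
  induction fuel with
  | zero => intro k acc hk hf; omega
  | succ fuel ih =>
    intro k acc hk hf
    rw [pvLoopA]
    simp only [PySem.Chars.len_eq, pvFindFrom_some_len]
    by_cases hneg : PySem.Chars.findFrom msg (c :: cs) (k:Int) none = -1
    · rw [hneg]
      norm_num
      rw [pvParts_no c cs (msg.drop k)
          ((PySem.Chars.findFrom_natCast_eq_neg_one_iff msg (c :: cs) k hk).mp hneg)]
      simp [pvEmit]
    · obtain ⟨hge, hpre, hmin⟩ := PySem.Chars.findFrom_natCast_spec msg (c :: cs) k hk hneg
      set idx := PySem.Chars.findFrom msg (c :: cs) (k:Int) none with hidx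
      have hnn : 0 ≤ idx := le_trans (by positivity) hge
      set j := idx.toNat with hjdef
      have hj : idx = (j:Int) := by omega
      have hm : 1 ≤ (c :: cs).length := by simp
      have hkj : k ≤ j := by omega
      have hjlen : j + (c :: cs).length ≤ msg.length := by
        have h2 := hpre.length_le
        simp only [List.length_drop, List.length_cons] at h2 ⊢
        omega
      rw [if_pos (by omega)]
      rw [hj]
      -- rewrite pvParts of msg.drop k via the first occurrence at relative position j - k
      have hdd : ∀ i : Nat, (msg.drop k).drop i = msg.drop (k + i) := by
        intro i
        rw [List.drop_drop]
      have hpre' : (c :: cs) <+: (msg.drop k).drop (j - k) := by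
        rw [hdd]
        have : k + (j - k) = j := by omega
        rw [this]
        exact hpre
      have hmin' : ∀ i, i < j - k → ¬ (c :: cs) <+: (msg.drop k).drop i := by
        intro i hi
        rw [hdd]
        exact hmin (k + i) (by omega) (by omega)
      rw [pvParts_first c cs (msg.drop k) (j - k) hpre' hmin']
      -- the continuation after the match
      have hcont : (msg.drop k).drop ((j - k) + (c :: cs).length) = msg.drop (j + (c :: cs).length) := by
        rw [hdd]
        congr 1
        omega
      rw [hcont]
      cases hps : pvParts c cs (msg.drop (j + (c :: cs).length)) with
      | nil => exact absurd hps (pvParts_ne_nil c cs _)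
      | cons q qs =>
        rw [pvEmit]
        have hplen : ((msg.drop k).take (j - k)).length = j - k := by
          simp
          omega
        rw [hplen]
        have hc1 : (k:Int) + ((j - k : Nat) : Int) = (j:Int) := by
          omega
        rw [hc1]
        have hc2 : (j:Int) + ((c :: cs).length : Int) = ((j + (c :: cs).length : Nat) : Int) := by
          push_cast; ring
        rw [hc2, ih (j + (c :: cs).length) _ (by omega) (by omega)]
        rw [hps, List.append_assoc]

-- ===== VERDICT (by name: the statement is the Claim_ definition above) =====
theorem get_unreplacable_spec : Claim_equal_get_unreplacable := by
  intro message replacement _ hpre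
  unfold Spec_get_unreplacable get_unreplacable get_unreplacable_alt
  have hne : replacement.toList ≠ [] := by
    intro h
    exact hpre (String.toList_eq_nil_iff.mp h)
  cases hrep : replacement.toList with
  | nil => exact absurd hrep hne
  | cons c cs =>
    rw [pvSplitOn_eq c cs, PySem.List.slice_to_neg_one]
    rw [pvFold_eq ((c :: cs).length : Int) (pvParts c cs message.toList) 0 []]
    have := pvLoopA_eq message.toList c cs (message.toList.length + 1) 0 [] (by omega) (by omega)
    simpa using this
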